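-- pv_equiv track=rewrite | github.com/atomadictech/atomadic-lang | src/atomadic_lang/a1_at_functions/atm_parse.py | _iter_decl_blocks
-- ===== SOURCE A (Python) =====
-- from collections.abc import Iterator
--
-- def _iter_decl_blocks(atm_text: str) -> Iterator[tuple[str, list[str]]]:
--     """Iterate (head_line, continuation_lines) tuples for each decl block.
--
--     A continuation line is any indented line immediately following a head
--     line. Empty lines and the package marker (``@<name>``) are also yielded
--     as head lines (with empty continuations) — the caller dispatches.
--     """
--     lines = atm_text.splitlines()
--     i = 0
--     while i < len(lines):
--         line = lines[i]
--         if not line.strip():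
--             i += 1
--             continue
--         if line[0].isspace():
--             # Stray indented line with no head — skip.
--             i += 1
--             continue
--         head = line.rstrip()
--         cont: list[str] = []
--         j = i + 1
--         while j < len(lines) and lines[j].startswith(" ") and lines[j].strip():
--             cont.append(lines[j].rstrip())
--             j += 1
--         yield head, cont
--         i = j
-- ===== SOURCE B (Python) =====
-- def _iter_decl_blocks(atm_text):
--     """Single flat pass: maintain a pending (head, cont) block and flush it
--     on blank lines, tab-indented lines, or a new head line."""
--     out = []
--     head = None
--     cont = []
--     for line in atm_text.splitlines():
--         if not line.strip():
--             if head is not None: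
--                 out.append((head, cont))
--             head, cont = None, []
--         elif line.startswith(" "):
--             if head is not None:
--                 cont.append(line.rstrip())
--         elif line[0].isspace():
--             if head is not None:
--                 out.append((head, cont))
--             head, cont = None, []
--         else:
--             if head is not None:
--                 out.append((head, cont))
--             head, cont = line.rstrip(), []
--     if head is not None:
--         out.append((head, cont))
--     return out
-- ===== Notes on version B (the rewrite author's own statement) =====
-- stated objective: simpler
-- what changed: Replaced the outer/inner index while-loops (inner lookahead scan with i=j jump) by a single flat pass over the lines maintaining a pending head and continuation accumulator that is flushed on blank/tab/head lines and once after the loop.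
import Mathlib
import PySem

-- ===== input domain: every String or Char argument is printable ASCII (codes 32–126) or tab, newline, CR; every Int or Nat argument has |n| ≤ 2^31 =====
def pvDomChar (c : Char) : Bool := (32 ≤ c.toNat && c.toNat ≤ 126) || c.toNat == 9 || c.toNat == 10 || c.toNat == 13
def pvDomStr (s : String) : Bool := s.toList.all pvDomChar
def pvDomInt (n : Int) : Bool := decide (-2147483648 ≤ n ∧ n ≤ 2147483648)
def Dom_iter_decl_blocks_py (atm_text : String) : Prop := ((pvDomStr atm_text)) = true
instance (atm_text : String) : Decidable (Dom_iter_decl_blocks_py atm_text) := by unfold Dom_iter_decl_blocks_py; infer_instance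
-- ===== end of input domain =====

-- B replaces A's outer/inner index loops by one flat pass with a pending-block accumulator (objective: simpler).

-- ===== PORT A =====
-- inner while loop of A: collect rstripped continuation lines, return them with the remaining lines
def pvTakeContA : List String → List String × List String
  | [] => ([], [])
  | l :: ls =>
    if PySem.Str.startswith l " " && !(PySem.Str.strip l == "") then
      let p := pvTakeContA ls
      (PySem.Str.rstrip l :: p.1, p.2)
    else ([], l :: ls)

theorem pvTakeContA_snd_length : ∀ ls : List String, (pvTakeContA ls).2.length ≤ ls.length := by
  intro ls
  induction ls with
  | nil => simp [pvTakeContA]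
  | cons l ls ih =>
    simp only [pvTakeContA]
    split
    · simpa using Nat.le_succ_of_le ih
    · simp

-- outer while loop of A over the remaining lines (i / j become the list suffix)
def pvGoA : List String → List (String × List String)
  | [] => []
  | line :: rest =>
    if PySem.Str.strip line == "" then pvGoA rest
    else if ((PySem.Str.pyGet? line 0).map PySem.Chars.isspace).getD false then pvGoA rest
    else
      let p := pvTakeContA rest
      (PySem.Str.rstrip line, p.1) :: pvGoA p.2
termination_by l => l.length
decreasing_by
  all_goals have := pvTakeContA_snd_length rest
  all_goals simp
  all_goals omega

def iter_decl_blocks_py (atm_text : String) : List (String × List String) :=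
  pvGoA (PySem.Str.splitlines atm_text)

-- ===== PORT B =====
def pvFlushB (out : List (String × List String)) (head? : Option String) (cont : List String) :
    List (String × List String) :=
  match head? with
  | some h => out ++ [(h, cont)]
  | none => out

def pvStepB (st : List (String × List String) × Option String × List String) (line : String) :
    List (String × List String) × Option String × List String :=
  if PySem.Str.strip line == "" then (pvFlushB st.1 st.2.1 st.2.2, none, [])
  else if PySem.Str.startswith line " " then
    match st.2.1 with
    | some h => (st.1, some h, st.2.2 ++ [PySem.Str.rstrip line])
    | none => st
  else if ((PySem.Str.pyGet? line 0).map PySem.Chars.isspace).getD false then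
    (pvFlushB st.1 st.2.1 st.2.2, none, [])
  else (pvFlushB st.1 st.2.1 st.2.2, some (PySem.Str.rstrip line), [])

def iter_decl_blocks_py_alt (atm_text : String) : List (String × List String) :=
  let st := (PySem.Str.splitlines atm_text).foldl pvStepB ([], none, [])
  pvFlushB st.1 st.2.1 st.2.2

-- ===== PRECONDITION & SPEC =====
def Spec_iter_decl_blocks_py (atm_text : String) (out : List (String × List String)) : Prop := out = iter_decl_blocks_py_alt atm_text
instance (atm_text : String) (out : List (String × List String)) : Decidable (Spec_iter_decl_blocks_py atm_text out) := by unfold Spec_iter_decl_blocks_py; infer_instance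

-- ===== CLAIM (what is proved, stated in full; the proofs are below) =====
def Claim_equal_iter_decl_blocks_py : Prop := ∀ (atm_text : String), Dom_iter_decl_blocks_py atm_text → Spec_iter_decl_blocks_py atm_text (iter_decl_blocks_py atm_text)

-- ===== LEMMAS AND PROOFS =====
theorem pv_goA_nil : pvGoA [] = [] := by simp only [pvGoA]

theorem pv_goA_blank (l : String) (ls : List String) (hb : (PySem.Str.strip l == "") = true) :
    pvGoA (l :: ls) = pvGoA ls := by
  conv_lhs => rw [pvGoA]
  rw [if_pos hb]

theorem pv_goA_ws (l : String) (ls : List String) (hb : (PySem.Str.strip l == "") = false)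
    (hi : ((PySem.Str.pyGet? l 0).map PySem.Chars.isspace).getD false = true) :
    pvGoA (l :: ls) = pvGoA ls := by
  conv_lhs => rw [pvGoA]
  rw [if_neg (by simp [hb]), if_pos hi]

theorem pv_goA_head (l : String) (ls : List String) (hb : (PySem.Str.strip l == "") = false)
    (hi : ((PySem.Str.pyGet? l 0).map PySem.Chars.isspace).getD false = false) :
    pvGoA (l :: ls) = (PySem.Str.rstrip l, (pvTakeContA ls).1) :: pvGoA (pvTakeContA ls).2 := by
  conv_lhs => rw [pvGoA]
  rw [if_neg (by simp [hb]), if_neg (by simpa using hi)]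

theorem pv_takeA_nil : pvTakeContA [] = ([], []) := by simp only [pvTakeContA]

theorem pv_takeA_cont (l : String) (ls : List String)
    (hs : PySem.Str.startswith l " " = true) (hb : (PySem.Str.strip l == "") = false) :
    pvTakeContA (l :: ls) = (PySem.Str.rstrip l :: (pvTakeContA ls).1, (pvTakeContA ls).2) := by
  conv_lhs => rw [pvTakeContA]
  rw [if_pos (by rw [hs, hb]; rfl)]

theorem pv_takeA_stop (l : String) (ls : List String)
    (h : (PySem.Str.startswith l " " && !(PySem.Str.strip l == "")) = false) :
    pvTakeContA (l :: ls) = ([], l :: ls) := by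
  conv_lhs => rw [pvTakeContA]
  rw [if_neg (by rw [h]; simp)]

theorem pv_stepB_blank (st : List (String × List String) × Option String × List String)
    (line : String) (h : (PySem.Str.strip line == "") = true) :
    pvStepB st line = (pvFlushB st.1 st.2.1 st.2.2, none, []) := by
  unfold pvStepB; rw [if_pos h]

theorem pv_stepB_cont (st : List (String × List String) × Option String × List String)
    (line : String) (hb : (PySem.Str.strip line == "") = false)
    (hs : PySem.Str.startswith line " " = true) :
    pvStepB st line = (match st.2.1 with
      | some h => (st.1, some h, st.2.2 ++ [PySem.Str.rstrip line])
      | none => st) := by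
  unfold pvStepB; rw [if_neg (by simp [hb]), if_pos hs]

theorem pv_stepB_ws (st : List (String × List String) × Option String × List String)
    (line : String) (hb : (PySem.Str.strip line == "") = false)
    (hs : PySem.Str.startswith line " " = false)
    (hi : ((PySem.Str.pyGet? line 0).map PySem.Chars.isspace).getD false = true) :
    pvStepB st line = (pvFlushB st.1 st.2.1 st.2.2, none, []) := by
  unfold pvStepB; rw [if_neg (by simp [hb]), if_neg (by simpa using hs), if_pos hi]

theorem pv_stepB_head (st : List (String × List String) × Option String × List String)
    (line : String) (hb : (PySem.Str.strip line == "") = false)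
    (hs : PySem.Str.startswith line " " = false)
    (hi : ((PySem.Str.pyGet? line 0).map PySem.Chars.isspace).getD false = false) :
    pvStepB st line = (pvFlushB st.1 st.2.1 st.2.2, some (PySem.Str.rstrip line), []) := by
  unfold pvStepB; rw [if_neg (by simp [hb]), if_neg (by simpa using hs), if_neg (by simpa using hi)]

theorem pv_first_isspace_of_startswith_space (l : String)
    (h : PySem.Str.startswith l " " = true) :
    ((PySem.Str.pyGet? l 0).map PySem.Chars.isspace).getD false = true := by
  have h' : (" ".toList) <+: l.toList :=
    (PySem.Chars.startswith_iff (s := l.toList) (p := " ".toList)).mp (by simpa using h)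
  obtain ⟨t, ht⟩ := h'
  simp at ht
  simp [← ht, PySem.List.pyGet?, PySem.List.pyIdx?, PySem.Chars.isspace]

theorem pv_run_spec : ∀ lines : List String,
    (∀ out, (let st := lines.foldl pvStepB (out, none, []); pvFlushB st.1 st.2.1 st.2.2)
      = out ++ pvGoA lines)
    ∧ (∀ out h cont, (let st := lines.foldl pvStepB (out, some h, cont); pvFlushB st.1 st.2.1 st.2.2)
      = out ++ (h, cont ++ (pvTakeContA lines).1) :: pvGoA (pvTakeContA lines).2) := by
  intro lines
  induction lines with
  | nil =>
    refine ⟨?_, ?_⟩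
    · intro out; simp [pvFlushB, pv_goA_nil]
    · intro out h cont; simp [pvFlushB, pv_takeA_nil, pv_goA_nil]
  | cons l ls ih =>
    obtain ⟨ihm, ihp⟩ := ih
    refine ⟨?_, ?_⟩
    · intro out
      rw [List.foldl_cons]
      cases hb : PySem.Str.strip l == "" with
      | true =>
        rw [pv_stepB_blank _ _ hb, pv_goA_blank _ _ hb]
        exact ihm out
      | false =>
        cases hs : PySem.Str.startswith l " " with
        | true =>
          have hi := pv_first_isspace_of_startswith_space l hs
          rw [pv_stepB_cont _ _ hb hs, pv_goA_ws _ _ hb hi]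
          exact ihm out
        | false =>
          cases hi : ((PySem.Str.pyGet? l 0).map PySem.Chars.isspace).getD false with
          | true =>
            rw [pv_stepB_ws _ _ hb hs hi, pv_goA_ws _ _ hb hi]
            exact ihm out
          | false =>
            rw [pv_stepB_head _ _ hb hs hi, pv_goA_head _ _ hb hi]
            have := ihp out (PySem.Str.rstrip l) []
            simpa using this
    · intro out h cont
      rw [List.foldl_cons]
      cases hb : PySem.Str.strip l == "" with
      | true =>
        rw [pv_stepB_blank _ _ hb, pv_takeA_stop _ _ (by rw [hb]; simp), pv_goA_blank _ _ hb]
        have := ihm (out ++ [(h, cont)])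
        simpa [pvFlushB, List.append_assoc] using this
      | false =>
        cases hs : PySem.Str.startswith l " " with
        | true =>
          rw [pv_stepB_cont _ _ hb hs, pv_takeA_cont _ _ hs hb]
          have := ihp out h (cont ++ [PySem.Str.rstrip l])
          simpa [List.append_assoc] using this
        | false =>
          cases hi : ((PySem.Str.pyGet? l 0).map PySem.Chars.isspace).getD false with
          | true =>
            rw [pv_stepB_ws _ _ hb hs hi, pv_takeA_stop _ _ (by rw [hs]; simp), pv_goA_ws _ _ hb hi]
            have := ihm (out ++ [(h, cont)])
            simpa [pvFlushB, List.append_assoc] using this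
          | false =>
            rw [pv_stepB_head _ _ hb hs hi, pv_takeA_stop _ _ (by rw [hs]; simp),
                pv_goA_head _ _ hb hi]
            have := ihp (out ++ [(h, cont)]) (PySem.Str.rstrip l) []
            simpa [pvFlushB, List.append_assoc] using this

-- ===== VERDICT (by name: the statement is the Claim_ definition above) =====
theorem iter_decl_blocks_py_spec : Claim_equal_iter_decl_blocks_py := by
  intro atm_text _
  unfold Spec_iter_decl_blocks_py iter_decl_blocks_py iter_decl_blocks_py_alt
  exact ((pv_run_spec (PySem.Str.splitlines atm_text)).1 []).symm
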